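-- pv_equiv track=rewrite | github.com/EliGambicchia/ASR_project_ivector_space | select_vowels_from_frames.py | longest_vowel
-- ===== SOURCE A (Python) =====
-- from itertools import groupby
-- from operator import itemgetter
--
-- def longest_vowel(dict_frames):
--
--     utt_vowel_dict = {}
--     for utterance, indices in dict_frames.items():
--
--         list_clusters = []
--         # consecutive elements
--         for k, g in groupby(enumerate(indices), lambda ix: ix[0] - ix[1]):
--             clusters = list(map(itemgetter(1), g))
--             list_clusters.append(clusters)
--
--         # selecting the longest vowel
--         longest_vowel = max(list_clusters, key=len)
--
--         utt_vowel_dict[utterance] = longest_vowel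
--
--     return utt_vowel_dict
-- ===== SOURCE B (Python) =====
-- def longest_vowel(dict_frames):
--     # One pass per utterance: track the current consecutive run and the best
--     # (strictly-longer update => first longest run wins, like max(..., key=len)).
--     utt_vowel_dict = {}
--     for utterance, indices in dict_frames.items():
--         best = []
--         cur = []
--         for v in indices:
--             if cur and v == cur[-1] + 1:
--                 cur = cur + [v]
--             else:
--                 cur = [v]
--             if len(best) < len(cur):
--                 best = cur
--         utt_vowel_dict[utterance] = best
--     return utt_vowel_dict
-- ===== Notes on version B (the rewrite author's own statement) =====
-- stated objective: faster
-- what changed: Instead of materialising every consecutive-index cluster via groupby/enumerate and then scanning them with max(key=len), B does a single pass per utterance keeping only the current run and the best run, updating the best only on strictly greater length (max's first-wins tie-break); no cluster lists or enumerate pairs are built.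
import Mathlib
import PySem

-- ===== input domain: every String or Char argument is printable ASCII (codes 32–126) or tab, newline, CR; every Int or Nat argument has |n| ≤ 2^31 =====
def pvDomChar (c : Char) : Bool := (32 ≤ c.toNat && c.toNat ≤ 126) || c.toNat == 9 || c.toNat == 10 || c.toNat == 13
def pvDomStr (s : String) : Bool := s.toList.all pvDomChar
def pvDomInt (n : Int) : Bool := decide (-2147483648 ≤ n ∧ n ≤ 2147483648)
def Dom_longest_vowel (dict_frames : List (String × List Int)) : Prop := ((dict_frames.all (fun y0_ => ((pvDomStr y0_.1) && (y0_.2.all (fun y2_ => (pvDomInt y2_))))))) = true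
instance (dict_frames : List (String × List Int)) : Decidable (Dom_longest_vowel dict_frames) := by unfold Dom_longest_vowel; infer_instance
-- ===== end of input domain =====

-- B replaces the groupby/enumerate + max(key=len) pipeline by a single pass per
-- utterance that tracks only the current consecutive run and the best run so far
-- (strictly-longer update preserves max's first-wins tie-break); a timing run measured B faster (no cluster lists are built).


-- ===== PORT A =====
-- hand port of `for k, g in groupby(enumerate(indices), lambda ix: ix[0] - ix[1])`
-- streaming collection of the groups (exact: adjacent enumerate pairs share the key
-- pos - value iff the next value is the previous value + 1); `cur` is the open group,
-- `acc` the closed ones, and we collect the values (itemgetter(1)) directly.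
def gbRuns : List Int → List Int → List (List Int) → List (List Int)
  | [], cur, acc => acc ++ [cur]
  | v :: rest, cur, acc =>
    match cur.getLast? with
    | some last => if v = last + 1 then gbRuns rest (cur ++ [v]) acc
                   else gbRuns rest [v] (acc ++ [cur])
    | none => gbRuns rest [v] acc   -- unreachable: cur is always nonempty

-- per-utterance body of A: clusters, then max(list_clusters, key=len)
-- (.getD [] only covers the empty-cluster case, where Python raises ValueError; excluded by Pre_)
def longestVowelA (indices : List Int) : List Int :=
  let list_clusters : List (List Int) :=
    match indices with
    | [] => []
    | v :: rest => gbRuns rest [v] []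
  (PySem.List.max? list_clusters (fun c => c.length)).getD []

def longest_vowel (dict_frames : List (String × List Int)) : List (String × List Int) :=
  (dict_frames.foldl (fun d p => PySem.Dict.insert d p.1 (longestVowelA p.2)) PySem.Dict.empty).items

-- ===== PORT B =====
def bStep (st : List Int × List Int) (v : Int) : List Int × List Int :=
  let cur' : List Int :=
    match st.2.getLast? with
    | some last => if v = last + 1 then st.2 ++ [v] else [v]
    | none => [v]
  (if st.1.length < cur'.length then cur' else st.1, cur')

def longestRunB (indices : List Int) : List Int :=
  (indices.foldl bStep ([], [])).1

def longest_vowel_alt (dict_frames : List (String × List Int)) : List (String × List Int) :=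
  (dict_frames.foldl (fun d p => PySem.Dict.insert d p.1 (longestRunB p.2)) PySem.Dict.empty).items

-- ===== PRECONDITION & SPEC =====
-- Pre_ excludes exactly the inputs where A raises: an utterance with an empty
-- indices list makes max() raise ValueError on the empty cluster list.
def Pre_longest_vowel (dict_frames : List (String × List Int)) : Prop :=
  (dict_frames.all (fun p => !p.2.isEmpty)) = true
instance (dict_frames : List (String × List Int)) : Decidable (Pre_longest_vowel dict_frames) := by
  unfold Pre_longest_vowel; infer_instance

def pvWitness_longest_vowel : (List (String × List Int)) := [("u", [1, 2, 5, 6, 7]), ("w", [3])]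

def Spec_longest_vowel (dict_frames : List (String × List Int)) (out : List (String × List Int)) : Prop := out = longest_vowel_alt dict_frames
instance (dict_frames : List (String × List Int)) (out : List (String × List Int)) : Decidable (Spec_longest_vowel dict_frames out) := by unfold Spec_longest_vowel; infer_instance

-- ===== CLAIM (what is proved, stated in full; the proofs are below) =====
def Claim_equal_longest_vowel : Prop := ∀ (dict_frames : List (String × List Int)), Dom_longest_vowel dict_frames → Pre_longest_vowel dict_frames → Spec_longest_vowel dict_frames (longest_vowel dict_frames)

-- ===== LEMMAS AND PROOFS =====

theorem max?_append_singleton (cs : List (List Int)) (c : List Int) :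
    PySem.List.max? (cs ++ [c]) (fun x => x.length) =
    some (match PySem.List.max? cs (fun x => x.length) with
          | none => c
          | some m => if m.length < c.length then c else m) := by
  cases h : PySem.List.max? cs (fun x => x.length) with
  | none =>
    simp only [PySem.List.max?] at h ⊢
    rw [List.foldl_append, List.foldl_cons, List.foldl_nil, h]
  | some m =>
    simp only [PySem.List.max?] at h ⊢
    rw [List.foldl_append, List.foldl_cons, List.foldl_nil, h]
    by_cases hm : m.length < c.length <;> simp [hm]

-- pure bookkeeping: how the "first longest" reacts to extending the last cluster
theorem best_update (mo : Option (List Int)) (cur : List Int) (v : Int) :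
    (match mo with
     | none => cur ++ [v]
     | some m => if m.length < (cur ++ [v]).length then cur ++ [v] else m)
    = (if (match mo with
           | none => cur
           | some m => if m.length < cur.length then cur else m : List Int).length
          < (cur ++ [v]).length
       then cur ++ [v]
       else (match mo with
             | none => cur
             | some m => if m.length < cur.length then cur else m)) := by
  cases mo with
  | none => simp
  | some m =>
    simp only [List.length_append, List.length_cons, List.length_nil]
    split_ifs <;> first | rfl | (exfalso; omega)

theorem fold_gb : ∀ (rest cur : List Int) (acc : List (List Int)) (best : List Int),
    cur ≠ [] →
    PySem.List.max? (acc ++ [cur]) (fun c => c.length) = some best →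
    PySem.List.max? (gbRuns rest cur acc) (fun c => c.length) =
      some ((rest.foldl bStep (best, cur)).1) := by
  intro rest
  induction rest with
  | nil =>
    intro cur acc best _ hbest
    simpa [gbRuns] using hbest
  | cons v rest ih =>
    intro cur acc best hcur hbest
    obtain ⟨last, hlast⟩ : ∃ last, cur.getLast? = some last := by
      cases h : cur.getLast? with
      | none => exact absurd (List.getLast?_eq_none_iff.mp h) hcur
      | some l => exact ⟨l, rfl⟩
    have hb0 : best = (match PySem.List.max? acc (fun x => x.length) with
        | none => cur
        | some m => if m.length < cur.length then cur else m) := by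
      have h0 := max?_append_singleton acc cur
      rw [hbest] at h0
      exact Option.some.inj h0
    by_cases hv : v = last + 1
    · -- extend the open group
      have hbest' : PySem.List.max? (acc ++ [cur ++ [v]]) (fun c => c.length) =
          some (if best.length < (cur ++ [v]).length then cur ++ [v] else best) := by
        rw [max?_append_singleton]
        rw [hb0]
        exact congrArg some (best_update _ cur v)
      have hstep : bStep (best, cur) v =
          (if best.length < (cur ++ [v]).length then cur ++ [v] else best, cur ++ [v]) := by
        simp [bStep, hlast, hv]
      simp only [gbRuns, hlast, if_pos hv, List.foldl_cons, hstep]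
      exact ih (cur ++ [v]) acc _ (by simp) hbest'
    · -- close the group, open a new one
      have hbest' : PySem.List.max? ((acc ++ [cur]) ++ [[v]]) (fun c => c.length) =
          some (if best.length < ([v] : List Int).length then [v] else best) := by
        rw [max?_append_singleton, hbest]
      have hstep : bStep (best, cur) v =
          (if best.length < ([v] : List Int).length then [v] else best, [v]) := by
        simp [bStep, hlast, hv]
      simp only [gbRuns, hlast, if_neg hv, List.foldl_cons, hstep]
      exact ih [v] (acc ++ [cur]) _ (by simp) hbest'

theorem perEntry (indices : List Int) (h : indices ≠ []) :
    longestVowelA indices = longestRunB indices := by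
  cases indices with
  | nil => exact absurd rfl h
  | cons v rest =>
    have hstart : PySem.List.max? (([] : List (List Int)) ++ [[v]]) (fun c => c.length) =
        some [v] := by
      simp [PySem.List.max?]
    have hkey := fold_gb rest [v] [] [v] (by simp) hstart
    have hfirst : bStep (([] : List Int), ([] : List Int)) v = ([v], [v]) := by
      simp [bStep]
    simp only [longestVowelA, longestRunB, List.foldl_cons, hfirst, hkey]
    rfl

theorem top_fold : ∀ (df : List (String × List Int)) (d : PySem.Dict String (List Int)),
    Pre_longest_vowel df →
    df.foldl (fun d p => PySem.Dict.insert d p.1 (longestVowelA p.2)) d =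
    df.foldl (fun d p => PySem.Dict.insert d p.1 (longestRunB p.2)) d := by
  intro df
  induction df with
  | nil => intro d _; rfl
  | cons p rest ih =>
    intro d hpre
    unfold Pre_longest_vowel at hpre
    simp only [List.all_cons, Bool.and_eq_true] at hpre
    have hp : p.2 ≠ [] := by
      intro hnil
      simp [hnil] at hpre
    simp only [List.foldl_cons, perEntry p.2 hp]
    exact ih _ hpre.2

-- ===== VERDICT (by name: the statement is the Claim_ definition above) =====
theorem longest_vowel_spec : Claim_equal_longest_vowel := by
  intro df _ hpre
  unfold Spec_longest_vowel longest_vowel longest_vowel_alt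
  rw [top_fold df PySem.Dict.empty hpre]
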